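-- pv_equiv track=rewrite | github.com/phyzicist/lspreader | sftools.py | chunkFair
-- ===== SOURCE A (Python) =====
-- def chunkFair(mylist, nchunks):
--     """ Split list into near-equal size chunks, but do it in an order like a draft pick; they all get high and low indices.
--     E.g. for mylist = [0,1,2,3,4,5,6], chunkFair(mylist,4)  => [[0, 4], [1, 5], [2, 6], [3]]
--     """
--     chunks = [None]*nchunks
--     for i in range(nchunks):
--         chunks[i] = []
--
--     i = 0
--     while i < len(mylist):
--         j = 0
--         while (i < len(mylist)) & (j < nchunks):
--             chunks[j].append(mylist[i])
--             j += 1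
--             i += 1
--     return chunks
-- ===== SOURCE B (Python) =====
-- def chunkFair(mylist, nchunks):
--     """ Split list into near-equal size chunks, but do it in an order like a draft pick; they all get high and low indices.
--     E.g. for mylist = [0,1,2,3,4,5,6], chunkFair(mylist,4)  => [[0, 4], [1, 5], [2, 6], [3]]
--     """
--     return [mylist[j::nchunks] for j in range(nchunks)]
-- ===== Notes on version B (the rewrite author's own statement) =====
-- stated objective: idiomatic
-- what changed: Replaces the nested round-robin while loops that append one element at a time across chunks by a single comprehension building each chunk as one strided slice mylist[j::nchunks].
import Mathlib
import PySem

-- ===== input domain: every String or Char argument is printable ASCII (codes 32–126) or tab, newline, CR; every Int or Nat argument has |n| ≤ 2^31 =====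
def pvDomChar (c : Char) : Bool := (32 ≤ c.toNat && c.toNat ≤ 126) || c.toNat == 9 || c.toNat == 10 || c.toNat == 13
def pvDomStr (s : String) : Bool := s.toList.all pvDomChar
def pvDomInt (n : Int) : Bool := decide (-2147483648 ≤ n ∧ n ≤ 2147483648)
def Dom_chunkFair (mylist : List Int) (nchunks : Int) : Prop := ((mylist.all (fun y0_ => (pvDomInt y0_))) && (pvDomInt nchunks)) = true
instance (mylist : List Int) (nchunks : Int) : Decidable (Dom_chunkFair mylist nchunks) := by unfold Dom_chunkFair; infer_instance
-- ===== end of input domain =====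

-- B replaces A's nested round-robin while loops by one strided slice mylist[j::nchunks]
-- per chunk (idiomatic; same output proved on Pre_, where A terminates).

-- ===== PORT A =====
-- inner while: `while (i < len(mylist)) & (j < nchunks): chunks[j].append(mylist[i]); j += 1; i += 1`
-- chunks[j] and mylist[i] are in range whenever read (0 ≤ i < len, 0 ≤ j ≤ len(chunks) at every
-- reachable state), so the total pyGetD/pySetD forms are exact there.
def chunkFairInner (xs : List Int) (n : Int) (chunks : List (List Int)) (i j : Int) :
    List (List Int) × Int :=
  if h : i < (xs.length : Int) ∧ j < n then
    chunkFairInner xs n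
      (PySem.List.pySetD chunks j ((PySem.List.pyGetD chunks j []) ++ [PySem.List.pyGetD xs i 0]))
      (i + 1) (j + 1)
  else (chunks, i)
termination_by ((xs.length : Int) - i).toNat
decreasing_by omega

-- outer while: `while i < len(mylist): j = 0; <inner>`.  Each pass of the Python loop that
-- makes progress advances i by at least 1, so fuel = len(mylist) + 1 never runs out whenever
-- the Python loop terminates (nchunks ≥ 1 or mylist = []); the fuel only makes the loop total.
def chunkFairOuter (xs : List Int) (n : Int) : List (List Int) → Int → Nat → List (List Int)
  | chunks, _, 0 => chunks
  | chunks, i, fuel + 1 =>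
    if i < (xs.length : Int) then
      let r := chunkFairInner xs n chunks i 0
      chunkFairOuter xs n r.1 r.2 fuel
    else chunks

-- chunks = [None]*nchunks, then chunks[i] = [] for i in range(nchunks): nchunks empty lists
def chunkFair (mylist : List Int) (nchunks : Int) : List (List Int) :=
  chunkFairOuter mylist nchunks (List.replicate nchunks.toNat []) 0 (mylist.length + 1)

-- ===== PORT B =====
-- [mylist[j::nchunks] for j in range(nchunks)]; any j drawn from range(nchunks) forces
-- nchunks ≥ 1 ≠ 0, so slice? is `some` there and `.getD []` only makes the expression total.
def chunkFair_alt (mylist : List Int) (nchunks : Int) : List (List Int) :=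
  (PySem.List.pyRange 0 nchunks 1).map
    (fun j => (PySem.List.slice? mylist (some j) none nchunks).getD [])

-- ===== PRECONDITION & SPEC =====
-- Pre_ excludes nchunks ≤ 0 with a non-empty mylist, where A's outer while loop never
-- terminates (the inner loop body is unreachable and i stays 0), so A returns no value.
def Pre_chunkFair (mylist : List Int) (nchunks : Int) : Prop :=
  1 ≤ nchunks ∨ mylist = []
instance (mylist : List Int) (nchunks : Int) : Decidable (Pre_chunkFair mylist nchunks) := by
  unfold Pre_chunkFair; infer_instance

def pvWitness_chunkFair : List Int × Int := ([0, 1, 2, 3, 4, 5, 6], 4)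

def Spec_chunkFair (mylist : List Int) (nchunks : Int) (out : List (List Int)) : Prop := out = chunkFair_alt mylist nchunks
instance (mylist : List Int) (nchunks : Int) (out : List (List Int)) : Decidable (Spec_chunkFair mylist nchunks out) := by unfold Spec_chunkFair; infer_instance

-- ===== CLAIM (what is proved, stated in full; the proofs are below) =====
def Claim_equal_chunkFair : Prop := ∀ (mylist : List Int) (nchunks : Int), Dom_chunkFair mylist nchunks → Pre_chunkFair mylist nchunks → Spec_chunkFair mylist nchunks (chunkFair mylist nchunks)

-- ===== LEMMAS AND PROOFS =====

-- the elements of xs at indices p, p + n, p + 2n, … (the common value both sides compute)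
def strideI (xs : List Int) (p n : Int) : List Int :=
  if _h : 0 ≤ p ∧ p < (xs.length : Int) ∧ 1 ≤ n then
    PySem.List.pyGetD xs p 0 :: strideI xs (p + n) n
  else []
termination_by ((xs.length : Int) - p).toNat
decreasing_by omega

lemma strideI_nil (xs : List Int) (p n : Int) (h : (xs.length : Int) ≤ p) :
    strideI xs p n = [] := by
  unfold strideI; rw [dif_neg]; omega

-- what the inner while loop does to the state: returns i advanced by min(len - i, n - j)
-- clamped at 0, and appends xs[i + (k - j)] to chunk k for the affected k
lemma inner_spec (xs : List Int) (n : Int) :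
    ∀ (fj : Nat) (C : List (List Int)) (i j : Int), 0 ≤ i → 0 ≤ j → (n - j).toNat ≤ fj →
    (chunkFairInner xs n C i j).2 = i + max 0 (min ((xs.length : Int) - i) (n - j)) ∧
    (chunkFairInner xs n C i j).1.length = C.length ∧
    ∀ k : Int, 0 ≤ k → k < (C.length : Int) →
      PySem.List.pyGetD (chunkFairInner xs n C i j).1 k [] =
        if j ≤ k ∧ k < n ∧ i + (k - j) < (xs.length : Int)
        then PySem.List.pyGetD C k [] ++ [PySem.List.pyGetD xs (i + (k - j)) 0]
        else PySem.List.pyGetD C k [] := by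
  intro fj
  induction fj with
  | zero =>
    intro C i j hi hj hf
    -- here n ≤ j, so the guard fails
    rw [chunkFairInner, dif_neg (by omega)]
    refine ⟨by omega, rfl, ?_⟩
    intro k hk hkC
    rw [if_neg (by omega)]
  | succ fj ih =>
    intro C i j hi hj hf
    by_cases hg : i < (xs.length : Int) ∧ j < n
    · rw [chunkFairInner, dif_pos hg]
      set C' := PySem.List.pySetD C j ((PySem.List.pyGetD C j []) ++ [PySem.List.pyGetD xs i 0]) with hC'
      obtain ⟨h2, hlen, hget⟩ := ih C' (i+1) (j+1) (by omega) (by omega) (by omega)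
      refine ⟨by rw [h2]; omega, by rw [hlen, hC', PySem.List.length_pySetD], ?_⟩
      intro k hk hkC
      rw [hget k hk (by rw [hC', PySem.List.length_pySetD]; exact hkC)]
      have hCk : PySem.List.pyGetD C' k [] =
          if k = j then (PySem.List.pyGetD C j []) ++ [PySem.List.pyGetD xs i 0]
          else PySem.List.pyGetD C k [] := by
        rw [hC', PySem.List.pySetD_of_nonneg _ _ (by omega)]
        by_cases hkj : k = j
        · subst hkj
          have hlt : k.toNat < C.length := by omega
          simp [PySem.List.pyGetD_of_nonneg _ _ hk, List.getD_eq_getElem?_getD,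
                List.getElem?_set_self', List.getElem?_eq_getElem hlt]
        · rw [if_neg hkj, PySem.List.pyGetD_of_nonneg _ _ hk, PySem.List.pyGetD_of_nonneg _ _ hk,
              List.getD_eq_getElem?_getD, List.getElem?_set_ne (by omega), List.getD_eq_getElem?_getD]
      by_cases hkj : k = j
      · subst hkj
        have harg : i + (k - k) = i := by ring
        rw [if_neg (by omega), hCk, if_pos rfl, harg, if_pos ⟨le_refl _, hg.2, hg.1⟩]
      · have harg : i + 1 + (k - (j + 1)) = i + (k - j) := by ring
        rw [hCk, if_neg hkj]
        by_cases hc : j + 1 ≤ k ∧ k < n ∧ (i + 1) + (k - (j + 1)) < (xs.length : Int)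
        · rw [if_pos hc, harg, if_pos (by omega)]
        · rw [if_neg hc, if_neg (by omega)]
    · rw [chunkFairInner, dif_neg hg]
      refine ⟨by omega, rfl, ?_⟩
      intro k hk hkC
      rw [if_neg (by omega)]

-- what the outer while loop does: chunk k receives exactly the elements at i + k, i + k + n, …
lemma outer_spec (xs : List Int) (n : Int) (hn : 1 ≤ n) :
    ∀ (fuel : Nat) (C : List (List Int)) (i : Int), 0 ≤ i →
    ((xs.length : Int) - i) ≤ (fuel : Int) →
    (chunkFairOuter xs n C i fuel).length = C.length ∧
    ∀ k : Int, 0 ≤ k → k < (C.length : Int) → k < n →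
      PySem.List.pyGetD (chunkFairOuter xs n C i fuel) k [] =
        PySem.List.pyGetD C k [] ++ strideI xs (i + k) n := by
  intro fuel
  induction fuel with
  | zero =>
    intro C i hi hf
    refine ⟨rfl, ?_⟩
    intro k hk hkC hkn
    rw [strideI_nil xs _ n (by push_cast at hf ⊢; omega), List.append_nil]
    rfl
  | succ fuel ih =>
    intro C i hi hf
    by_cases hil : i < (xs.length : Int)
    · rw [chunkFairOuter, if_pos hil]
      show (chunkFairOuter xs n (chunkFairInner xs n C i 0).1 (chunkFairInner xs n C i 0).2 fuel).length = C.length ∧ _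
      obtain ⟨h2, hlen, hget⟩ := inner_spec xs n n.toNat C i 0 hi le_rfl (by omega)
      have hr2 : (chunkFairInner xs n C i 0).2 = i + min ((xs.length : Int) - i) n := by
        rw [h2]; omega
      obtain ⟨hlen', hget'⟩ := ih (chunkFairInner xs n C i 0).1 (chunkFairInner xs n C i 0).2
        (by omega) (by push_cast at hf ⊢; omega)
      refine ⟨by rw [hlen', hlen], ?_⟩
      intro k hk hkC hkn
      rw [hget' k hk (by rw [hlen]; exact hkC) hkn,
          hget k hk hkC]
      have hsub : k - 0 = k := by ring
      rw [hsub]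
      by_cases hik : i + k < (xs.length : Int)
      · rw [if_pos ⟨hk, hkn, hik⟩]
        conv_rhs => rw [strideI, dif_pos ⟨by omega, hik, hn⟩]
        have htail : strideI xs ((chunkFairInner xs n C i 0).2 + k) n = strideI xs (i + k + n) n := by
          by_cases hmin : (xs.length : Int) - i ≤ n
          · rw [strideI_nil xs _ n (by omega), strideI_nil xs _ n (by omega)]
          · rw [hr2]
            congr 1
            omega
        rw [htail, List.append_assoc, List.singleton_append]
      · rw [if_neg (by omega), strideI_nil xs (i + k) n (by omega),
            strideI_nil xs _ n (by omega)]
    · rw [chunkFairOuter, if_neg hil]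
      refine ⟨rfl, ?_⟩
      intro k hk hkC hkn
      rw [strideI_nil xs _ n (by omega), List.append_nil]

-- evaluate mylist[j::n] for 0 ≤ j, 1 ≤ n to its filterMap normal form
lemma slice_eval (xs : List Int) (n j : Int) (hn : 1 ≤ n) (hj : 0 ≤ j) :
    (PySem.List.slice? xs (some j) none n).getD [] =
      List.filterMap (fun (k : Nat) => xs[(min j (xs.length : Int) + n * (k : Int)).toNat]?)
        (List.range (if min j (xs.length : Int) < (xs.length : Int)
          then (((xs.length : Int) - min j (xs.length : Int) + n - 1) / n).toNat else 0)) := by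
  rw [PySem.List.slice?, PySem.List.sliceIndices]
  simp only [if_neg (by omega : ¬ n = 0), if_neg (by omega : ¬ n < 0), if_pos (by omega : 0 < n)]
  rw [if_neg (by omega : ¬ j < 0)]
  simp only [Option.getD_some]

-- mylist[j::n] (0 ≤ j, 1 ≤ n) is exactly the strided selection strideI
lemma slice_eq_strideI (xs : List Int) (n : Int) (hn : 1 ≤ n) :
    ∀ (fp : Nat) (j : Int), 0 ≤ j → ((xs.length : Int) - j).toNat ≤ fp →
      (PySem.List.slice? xs (some j) none n).getD [] = strideI xs j n := by
  intro fp
  induction fp with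
  | zero =>
    intro j hj hf
    rw [slice_eval xs n j hn hj, strideI_nil xs j n (by omega),
        min_eq_right (by omega : (xs.length : Int) ≤ j), if_neg (by omega), List.range_zero,
        List.filterMap_nil]
  | succ fp ih =>
    intro j hj hf
    by_cases hjl : j < (xs.length : Int)
    · rw [slice_eval xs n j hn hj, min_eq_left (by omega), if_pos hjl]
      have hd0 : 0 ≤ ((xs.length : Int) - j - 1) / n := Int.ediv_nonneg (by omega) (by omega)
      have hc : ((xs.length : Int) - j + n - 1) / n = ((xs.length : Int) - j - 1) / n + 1 := by
        have h1 : (xs.length : Int) - j + n - 1 = ((xs.length : Int) - j - 1) + 1 * n := by ring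
        rw [h1, Int.add_mul_ediv_right _ _ (by omega : n ≠ 0)]
      have hcn : (((xs.length : Int) - j + n - 1) / n).toNat = (((xs.length : Int) - j - 1) / n).toNat + 1 := by
        omega
      rw [hcn, List.range_succ_eq_map, List.filterMap_cons, List.filterMap_map]
      have hj0 : (j + n * ((0 : Nat) : Int)).toNat = j.toNat := by push_cast; omega
      have hjlt : j.toNat < xs.length := by omega
      rw [hj0, List.getElem?_eq_getElem hjlt]
      have htail : List.filterMap ((fun (k : Nat) => xs[(j + n * (k : Int)).toNat]?) ∘ Nat.succ)
          (List.range (((xs.length : Int) - j - 1) / n).toNat) =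
          strideI xs (j + n) n := by
        rw [← ih (j + n) (by omega) (by omega), slice_eval xs n (j + n) hn (by omega)]
        by_cases hnl : j + n < (xs.length : Int)
        · rw [min_eq_left (by omega), if_pos hnl]
          have hcc : ((xs.length : Int) - (j + n) + n - 1) = (xs.length : Int) - j - 1 := by ring
          rw [hcc]
          apply List.filterMap_congr
          intro k _
          have : j + n * ((Nat.succ k : Nat) : Int) = (j + n) + n * (k : Int) := by push_cast; ring
          simp only [Function.comp_apply, this]
        · rw [min_eq_right (by omega), if_neg (by omega), List.range_zero, List.filterMap_nil]
          have : (((xs.length : Int) - j - 1) / n) = 0 := by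
            apply Int.ediv_eq_zero_of_lt (by omega) (by omega)
          rw [this]
          simp
      rw [htail]
      conv_rhs => rw [strideI, dif_pos ⟨hj, hjl, hn⟩]
      rw [PySem.List.pyGetD_eq_getElem xs 0 hj (by omega)]
    · rw [slice_eval xs n j hn hj, strideI_nil xs j n (by omega),
          min_eq_right (by omega), if_neg (by omega), List.range_zero, List.filterMap_nil]

-- ===== VERDICT (by name: the statement is the Claim_ definition above) =====
theorem chunkFair_spec : Claim_equal_chunkFair := by
  intro xs n _hdom hpre
  show chunkFair xs n = chunkFair_alt xs n
  by_cases hn : 1 ≤ n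
  · obtain ⟨hlenA, hgetA⟩ := outer_spec xs n hn (xs.length + 1)
      (List.replicate n.toNat []) 0 le_rfl (by push_cast; omega)
    rw [chunkFair, chunkFair_alt]
    apply List.ext_getElem
    · rw [hlenA, List.length_replicate, List.length_map, PySem.List.length_pyRange_one]
      omega
    · intro m hm1 hm2
      have hmn : m < n.toNat := by
        rw [hlenA, List.length_replicate] at hm1; exact hm1
      -- A side
      have hA := hgetA (m : Int) (by omega)
        (by rw [List.length_replicate]; omega) (by omega)
      rw [PySem.List.pyGetD_natCast, PySem.List.pyGetD_natCast] at hA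
      rw [List.getD_eq_getElem?_getD, List.getElem?_eq_getElem hm1, Option.getD_some] at hA
      rw [List.getD_eq_getElem?_getD, List.getElem?_eq_getElem
            (by rw [List.length_replicate]; exact hmn), Option.getD_some,
          List.getElem_replicate, List.nil_append, zero_add] at hA
      rw [hA]
      -- B side
      rw [List.getElem_map, PySem.List.getElem_pyRange_one, zero_add]
      exact (slice_eq_strideI xs n hn xs.length (m : Int) (by omega) (by omega)).symm
  · have hxs : xs = [] := hpre.resolve_left hn
    subst hxs
    rw [chunkFair_alt, PySem.List.pyRange_one_eq_nil (by omega : n ≤ 0), List.map_nil,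
        chunkFair]
    show chunkFairOuter [] n (List.replicate n.toNat []) 0 (0 + 1) = []
    rw [chunkFairOuter, if_neg (by simp), show n.toNat = 0 by omega, List.replicate_zero]
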